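-- pv_equiv track=rewrite | github.com/PigeonLabs/Every_day_BOJ | Python/백준/Gold/1407. 2로 몇 번 나누어질까/2로 몇 번 나누어질까.py | calc
-- ===== SOURCE A (Python) =====
-- def calc(n):
--     if n == 0:
--         return 0
--     elif n == 1:
--         return 1
--     elif n&1:
--         return n//2 + 2*calc(n//2) + 1
--     else:
--         return n//2 + 2*calc(n//2)
-- ===== SOURCE B (Python) =====
-- def calc(n):
--     res = 0
--     w = 1
--     m = n
--     while m > 1:
--         res += w * (m // 2 + (m & 1))
--         w *= 2
--         m //= 2
--     if m == 1:
--         res += w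
--     return res
-- ===== Notes on version B (the rewrite author's own statement) =====
-- stated objective: simpler
-- what changed: Replaces the recursion with a forward loop that folds the same halving recurrence, maintaining an accumulator and a doubling weight instead of a call stack.
import Mathlib
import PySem

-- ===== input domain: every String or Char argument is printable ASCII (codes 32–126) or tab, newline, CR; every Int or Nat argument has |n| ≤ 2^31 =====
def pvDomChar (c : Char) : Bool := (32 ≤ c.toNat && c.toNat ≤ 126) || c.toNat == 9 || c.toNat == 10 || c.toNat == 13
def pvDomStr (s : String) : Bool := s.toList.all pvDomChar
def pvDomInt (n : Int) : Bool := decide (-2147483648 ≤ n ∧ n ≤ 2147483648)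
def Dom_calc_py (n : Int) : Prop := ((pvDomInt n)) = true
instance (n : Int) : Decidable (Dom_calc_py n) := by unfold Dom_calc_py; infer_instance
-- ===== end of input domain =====

-- B replaces A's recursion by a forward loop folding the same halving recurrence with an
-- accumulator and a doubling weight (objective: simpler, no recursion).

-- ===== PORT A =====
def calc_py (n : Int) : Int :=
  if _h0 : n = 0 then 0
  else if _h1 : n = 1 then 1
  else if _hneg : n < 0 then 0  -- Python recurses forever here (RecursionError); outside Pre_
  else if _hodd : PySem.Int.band n 1 ≠ 0 then
    PySem.Int.floordiv n 2 + 2 * calc_py (PySem.Int.floordiv n 2) + 1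
  else
    PySem.Int.floordiv n 2 + 2 * calc_py (PySem.Int.floordiv n 2)
termination_by n.toNat
decreasing_by
  all_goals
    rw [PySem.Int.floordiv_eq_ediv_of_pos (by omega)]
    omega

-- ===== PORT B =====
def calc_py_loop (m res w : Int) : Int :=
  if _h : m > 1 then
    calc_py_loop (PySem.Int.floordiv m 2)
      (res + w * (PySem.Int.floordiv m 2 + PySem.Int.band m 1)) (w * 2)
  else if m = 1 then res + w
  else res
termination_by m.toNat
decreasing_by
  rw [PySem.Int.floordiv_eq_ediv_of_pos (by omega)]
  omega

def calc_py_alt (n : Int) : Int := calc_py_loop n 0 1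

-- ===== PRECONDITION & SPEC =====
-- Pre_ excludes negative n, on which Python's calc recurses forever (RecursionError).
def Pre_calc_py (n : Int) : Prop := 0 ≤ n
instance (n : Int) : Decidable (Pre_calc_py n) := by unfold Pre_calc_py; infer_instance
def pvWitness_calc_py : Int := 5

def Spec_calc_py (n : Int) (out : Int) : Prop := out = calc_py_alt n
instance (n : Int) (out : Int) : Decidable (Spec_calc_py n out) := by unfold Spec_calc_py; infer_instance

-- ===== CLAIM (what is proved, stated in full; the proofs are below) =====
def Claim_equal_calc_py : Prop := ∀ (n : Int), Dom_calc_py n → Pre_calc_py n → Spec_calc_py n (calc_py n)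

-- ===== LEMMAS AND PROOFS =====

-- Loop invariant: for nonnegative m the loop computes res + w * calc_py m.
theorem calc_py_loop_eq (k : Nat) :
    ∀ m res w : Int, m.toNat = k → 0 ≤ m → calc_py_loop m res w = res + w * calc_py m := by
  induction k using Nat.strong_induction_on with
  | _ k ih =>
    intro m res w hk hm
    rw [calc_py_loop]
    by_cases h1 : m > 1
    · have h2 : PySem.Int.floordiv m 2 = m / 2 := PySem.Int.floordiv_eq_ediv_of_pos (by omega)
      have hb : PySem.Int.band m 1 = m % 2 := by
        rw [PySem.Int.band_one, PySem.Int.mod_eq_emod_of_pos (by omega)]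
      simp only [h1, dif_pos]
      rw [h2, hb, ih (m / 2).toNat (by omega) _ _ _ rfl (by omega)]
      conv_rhs => rw [calc_py]
      simp only [h2, hb]
      rw [dif_neg (by omega), dif_neg (by omega), dif_neg (by omega)]
      by_cases hodd : m % 2 = 0
      · rw [dif_neg (by simp [hodd]), hodd]; ring
      · rw [dif_pos hodd]
        have h3 : m % 2 = 1 := by omega
        rw [h3]; ring
    · simp only [h1, dif_neg, not_false_iff]
      by_cases hm1 : m = 1
      · subst hm1
        rw [if_pos rfl, calc_py]
        norm_num
      · have hm0 : m = 0 := by omega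
        subst hm0
        rw [if_neg (by norm_num), calc_py]
        norm_num

-- ===== VERDICT (by name: the statement is the Claim_ definition above) =====
theorem calc_py_spec : Claim_equal_calc_py := by
  intro n _ hpre
  unfold Spec_calc_py calc_py_alt
  rw [calc_py_loop_eq n.toNat n 0 1 rfl hpre]
  ring
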